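-- pv_equiv track=rewrite | github.com/Gitter150/Python | CIRCULARPERMS.py | circular_permutations
-- ===== SOURCE A (Python) =====
-- from itertools import permutations
--
-- def circular_permutations(x:list)->list:
--
--     first=x[0]
--     rest=x[1:]
--     result=[]
--     arrangements=permutations(rest)
--     for arrangement in arrangements:
--         circular_perm=(first,)+arrangement
--         result.append(circular_perm)
--     return result
--
-- list=['A','B','C','D']
-- ===== SOURCE B (Python) =====
-- def _picks(items):
--     """All (chosen, remaining) pairs in index order, remaining order preserved."""
--     if not items:
--         return []
--     head, tail = items[0], items[1:]
--     return [(head, tail)] + [(h, [head] + r) for (h, r) in _picks(tail)]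
--
--
-- def _permute(items):
--     """Permutation tuples of items in itertools' positional order."""
--     if not items:
--         return [()]
--     return [(h,) + p for (h, rest) in _picks(items) for p in _permute(rest)]
--
--
-- def circular_permutations(x: list) -> list:
--     first = x[0]
--     return [(first,) + p for p in _permute(x[1:])]
-- ===== Notes on version B (the rewrite author's own statement) =====
-- stated objective: alternative
-- what changed: Replaces the itertools.permutations call plus append loop by a recursive construction: a _picks helper enumerates (chosen, remaining) pairs in index order and _permute recursively builds permutation tuples, reproducing itertools' positional order.
import Mathlib
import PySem

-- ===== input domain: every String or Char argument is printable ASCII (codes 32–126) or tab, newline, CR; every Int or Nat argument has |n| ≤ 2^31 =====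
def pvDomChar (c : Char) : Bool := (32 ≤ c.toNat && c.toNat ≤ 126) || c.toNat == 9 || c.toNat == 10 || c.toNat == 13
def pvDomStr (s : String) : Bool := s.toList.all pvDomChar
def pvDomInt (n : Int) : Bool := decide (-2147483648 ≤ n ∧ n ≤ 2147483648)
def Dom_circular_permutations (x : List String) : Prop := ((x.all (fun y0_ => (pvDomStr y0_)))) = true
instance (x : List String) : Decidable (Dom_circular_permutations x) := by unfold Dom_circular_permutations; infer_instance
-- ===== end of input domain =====

-- B replaces the itertools.permutations loop by a recursive pick-head-and-recurse construction (same value, different decomposition).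

-- ===== PORT A =====
-- A: first = x[0]; rest = x[1:]; for arrangement in permutations(rest): result.append((first,)+arrangement)
def circular_permutations (x : List String) : List (List String) :=
  match PySem.List.pyGet? x 0 with
  | none => []  -- IndexError on empty x; excluded by Pre_
  | some first =>
    let rest := PySem.List.slice x (some 1) none
    let arrangements := PySem.List.permutations rest rest.length
    arrangements.foldl (fun result arrangement => result ++ [first :: arrangement]) []

-- ===== PORT B =====
-- _picks items: all (chosen, remaining) pairs in index order, remaining order preserved.
def pvPicks : List String → List (String × List String)
  | [] => []
  | head :: tail => (head, tail) :: (pvPicks tail).map (fun hr => (hr.1, head :: hr.2))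

-- termination fact for pvPermute (cited in its decreasing_by)
theorem pvPicks_len {p : String × List String} : ∀ {l : List String}, p ∈ pvPicks l → p.2.length + 1 = l.length := by
  intro l
  induction l generalizing p with
  | nil => intro h; cases h
  | cons a t ih =>
    intro h
    simp only [pvPicks, List.mem_cons, List.mem_map] at h
    rcases h with rfl | ⟨q, hq, rfl⟩
    · simp
    · simp [← ih hq]

-- _permute items: permutation lists of items in itertools' positional order.
def pvPermute (l : List String) : List (List String) :=
  match l with
  | [] => [[]]
  | a :: t => ((pvPicks (a :: t)).attach).flatMap (fun hr => (pvPermute hr.1.2).map (hr.1.1 :: ·))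
termination_by l.length
decreasing_by
  have := pvPicks_len hr.2
  simp at this ⊢
  omega

def circular_permutations_alt (x : List String) : List (List String) :=
  match PySem.List.pyGet? x 0 with
  | none => []
  | some first => (pvPermute (PySem.List.slice x (some 1) none)).map (first :: ·)

-- ===== PRECONDITION & SPEC =====
-- A raises IndexError (x[0]) on the empty list; nothing else raises.
def Pre_circular_permutations (x : List String) : Prop := x ≠ []
instance (x : List String) : Decidable (Pre_circular_permutations x) := by unfold Pre_circular_permutations; infer_instance
def pvWitness_circular_permutations : List String := (["A", "B", "C"])
def Spec_circular_permutations (x : List String) (out : List (List String)) : Prop := out = circular_permutations_alt x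
instance (x : List String) (out : List (List String)) : Decidable (Spec_circular_permutations x out) := by unfold Spec_circular_permutations; infer_instance

-- ===== CLAIM (what is proved, stated in full; the proofs are below) =====
def Claim_equal_circular_permutations : Prop := ∀ (x : List String), Dom_circular_permutations x → Pre_circular_permutations x → Spec_circular_permutations x (circular_permutations x)

-- ===== LEMMAS AND PROOFS =====

-- bridge: an index-based flatMap over range (A's library permutations) equals the picks-based flatMap
theorem range_flatMap_eq_picks_flatMap {β : Type} (g : String → List String → List β) :
    ∀ (l : List String),
      (List.range l.length).flatMap
        (fun i => match l[i]? with | none => [] | some v => g v (l.eraseIdx i))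
      = (pvPicks l).flatMap (fun p => g p.1 p.2) := by
  intro l
  induction l generalizing g with
  | nil => simp [pvPicks]
  | cons a t ih =>
    simp only [List.length_cons, List.range_succ_eq_map, List.flatMap_cons, List.flatMap_map,
      pvPicks]
    have h2 : (List.range t.length).flatMap
        (fun i => match t[i]? with | none => [] | some v => g v (a :: t.eraseIdx i))
        = (pvPicks t).flatMap (fun p => g p.1 (a :: p.2)) :=
      ih (fun v r => g v (a :: r))
    simpa using h2

theorem flatMap_attach_eq (l : List (String × List String))
    (f : String × List String → List (List String)) :
    l.attach.flatMap (fun hr => f hr.1) = l.flatMap f := by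
  simp

theorem permutations_succ (l : List String) (n : Nat) :
    PySem.List.permutations l (n + 1)
      = (pvPicks l).flatMap (fun p => (PySem.List.permutations p.2 n).map (p.1 :: ·)) := by
  rw [PySem.List.permutations]
  refine Eq.trans ?_ (range_flatMap_eq_picks_flatMap (fun v r => (PySem.List.permutations r n).map (v :: ·)) l)
  congr 1
  funext i
  cases l[i]? <;> rfl

theorem permutations_eq_pvPermute :
    ∀ (n : Nat) (l : List String), l.length = n →
      PySem.List.permutations l n = pvPermute l := by
  intro n
  induction n with
  | zero =>
    intro l hl
    rw [List.length_eq_zero_iff] at hl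
    subst hl
    rw [PySem.List.permutations, pvPermute]
  | succ n ih =>
    intro l hl
    cases l with
    | nil => simp at hl
    | cons a t =>
      have hatt : ((pvPicks (a :: t)).attach).flatMap
            (fun hr => (pvPermute hr.1.2).map (hr.1.1 :: ·))
          = (pvPicks (a :: t)).flatMap (fun p => (pvPermute p.2).map (p.1 :: ·)) :=
        flatMap_attach_eq _ (fun p => (pvPermute p.2).map (p.1 :: ·))
      rw [pvPermute, hatt, permutations_succ]
      apply List.flatMap_congr
      intro p hp
      have hlen := pvPicks_len hp
      have hn : t.length = n := by simpa using hl
      rw [ih p.2 (by simp at hlen; omega)]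


-- ===== VERDICT (by name: the statement is the Claim_ definition above) =====
theorem circular_permutations_spec : Claim_equal_circular_permutations := by
  intro x hdom hpre
  unfold Spec_circular_permutations circular_permutations circular_permutations_alt
  cases x with
  | nil => exact absurd rfl hpre
  | cons a t =>
    have hget : PySem.List.pyGet? (a :: t) 0 = some a := by
      simp [PySem.List.pyGet?, PySem.List.pyIdx?]
    rw [hget]
    simp only [PySem.List.slice_from_one, List.tail_cons]
    rw [PySem.List.foldl_append_singleton_eq_map (fun arrangement => a :: arrangement)
        (PySem.List.permutations t t.length) []]
    rw [permutations_eq_pvPermute t.length t rfl]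
    simp
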